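-- pv_equiv track=rewrite | github.com/JungYeonHwi/Algorithm_Study | python/BaekJoon_python/20000~29999/24000~24999/24265.py | check
-- ===== SOURCE A (Python) =====
-- def check(n) :
--     s = 0
--     cnt = 0
--     for i in range(n-1) :
--         for j in range(i+1, n) :
--             s += i * j
--             cnt += 1
--
--     return cnt
-- ===== SOURCE B (Python) =====
-- def check(n):
--     # closed form: number of pairs (i, j) with 0 <= i < j < n
--     return n * (n - 1) // 2 if n > 1 else 0
-- ===== Notes on version B (the rewrite author's own statement) =====
-- stated objective: faster
-- what changed: Replaced the quadratic double loop that counts pairs i<j with the closed form n*(n-1)//2 (0 for n<=1).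
import Mathlib
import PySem

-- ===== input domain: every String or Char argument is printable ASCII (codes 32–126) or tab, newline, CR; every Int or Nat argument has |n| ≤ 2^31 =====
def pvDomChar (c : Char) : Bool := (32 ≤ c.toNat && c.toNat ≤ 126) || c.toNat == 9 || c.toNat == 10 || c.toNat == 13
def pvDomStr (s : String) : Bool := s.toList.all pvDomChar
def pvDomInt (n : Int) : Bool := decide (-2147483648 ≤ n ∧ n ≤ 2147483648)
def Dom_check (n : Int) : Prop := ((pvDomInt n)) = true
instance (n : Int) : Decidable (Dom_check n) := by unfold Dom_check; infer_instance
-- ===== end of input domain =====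

-- B replaces A's quadratic pair-counting double loop by the closed form n*(n-1)//2 (0 for n ≤ 1): asymptotically faster.

-- ===== PORT A =====
def check (n : Int) : Int :=
  let st :=
    (PySem.List.pyRange 0 (n - 1) 1).foldl
      (fun (st : Int × Int) i =>
        (PySem.List.pyRange (i + 1) n 1).foldl
          (fun (st2 : Int × Int) j => (st2.1 + i * j, st2.2 + 1)) st)
      (0, 0)
  st.2

-- ===== PORT B =====
def check_alt (n : Int) : Int :=
  if n > 1 then PySem.Int.floordiv (n * (n - 1)) 2 else 0

-- ===== PRECONDITION & SPEC =====
def Spec_check (n : Int) (out : Int) : Prop := out = check_alt n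
instance (n : Int) (out : Int) : Decidable (Spec_check n out) := by unfold Spec_check; infer_instance

-- ===== CLAIM (what is proved, stated in full; the proofs are below) =====
def Claim_equal_check : Prop := ∀ (n : Int), Dom_check n → Spec_check n (check n)

-- ===== LEMMAS AND PROOFS =====

-- inner loop: only adds the list length to the counter
theorem inner_snd (i : Int) (l : List Int) (st : Int × Int) :
    (l.foldl (fun (st2 : Int × Int) j => (st2.1 + i * j, st2.2 + 1)) st).2
      = st.2 + l.length := by
  induction l generalizing st with
  | nil => simp
  | cons x xs ih => simp [List.foldl, ih]; omega

-- outer loop: counter = sum of the inner range lengths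
theorem outer_snd (n : Int) (l : List Int) (st : Int × Int) :
    ((l.foldl
      (fun (st : Int × Int) i =>
        (PySem.List.pyRange (i + 1) n 1).foldl
          (fun (st2 : Int × Int) j => (st2.1 + i * j, st2.2 + 1)) st) st)).2
      = st.2 + (l.map (fun i => ((n - (i + 1)).toNat : Int))).sum := by
  induction l generalizing st with
  | nil => simp
  | cons x xs ih =>
      simp [List.foldl, ih, inner_snd, PySem.List.length_pyRange_one]
      ring

theorem check_spec : Claim_equal_check := by
  intro n _
  unfold Spec_check check check_alt
  rw [outer_snd]
  by_cases h : n > 1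
  · simp only [if_pos h]
    rw [PySem.List.pyRange_one]
    simp only [sub_zero]
    set m := (n - 1).toNat with hmdef
    have hm : (m : Int) = n - 1 := Int.toNat_of_nonneg (by omega)
    rw [List.map_map]
    have hfin : ((List.range m).map
        ((fun i => ((n - (i + 1)).toNat : Int)) ∘ (fun k : ℕ => (0 : Int) + ↑k))).sum
        = ∑ k ∈ Finset.range m, ((n - ((0 : Int) + ↑k + 1)).toNat : Int) := rfl
    rw [hfin]
    have hcongr : ∑ k ∈ Finset.range m, ((n - ((0 : Int) + ↑k + 1)).toNat : Int)
        = ∑ k ∈ Finset.range m, (n - 1 - (k : Int)) := by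
      apply Finset.sum_congr rfl
      intro k hk
      have hk' : (k : Int) < m := by exact_mod_cast Finset.mem_range.mp hk
      have : (0 : Int) ≤ n - (0 + ↑k + 1) := by omega
      omega
    rw [hcongr]
    have hG : (∑ k ∈ Finset.range m, (k : Int)) * 2 = (m : Int) * ((m : Int) - 1) := by
      by_cases hm0 : m = 0
      · rw [hmdef] at hm0 ⊢; simp [hm0]
      · have h1 : (1 : ℕ) ≤ m := Nat.one_le_iff_ne_zero.mpr hm0
        have hnat := Finset.sum_range_id_mul_two m
        zify [h1] at hnat
        linarith
    have hS : ∑ k ∈ Finset.range m, (n - 1 - (k : Int))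
        = (m : Int) * (n - 1) - ∑ k ∈ Finset.range m, (k : Int) := by
      rw [Finset.sum_sub_distrib, Finset.sum_const, Finset.card_range]
      ring
    rw [PySem.Int.floordiv_eq_ediv_of_pos (by norm_num)]
    have h2 : (∑ k ∈ Finset.range m, (n - 1 - (k : Int))) * 2 = n * (n - 1) := by
      rw [hS]
      have : (m : Int) = n - 1 := hm
      rw [this] at hG ⊢
      linarith [hG]
    omega
  · simp only [if_neg h]
    rw [PySem.List.pyRange_one_eq_nil (by omega)]
    simp

-- ===== VERDICT (by name: the statement is the Claim_ definition above) =====
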